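-- pv_equiv track=rewrite | github.com/palhs/stratum | reasoning/app/nodes/entry_quality.py | _compute_base_tier
-- ===== SOURCE A (Python) =====
-- _LABEL_SCORES: dict[str, int] = {
--     # Macro labels
--     "Supportive": 2,
--     "Mixed": 1,
--     "Headwind": 0,
--     # Valuation labels
--     "Attractive": 2,
--     "Fair": 1,
--     "Stretched": 0,
--     # Structure labels
--     "Constructive": 2,
--     "Neutral": 1,
--     "Deteriorating": 0,
-- }
--
-- _SCORE_TO_TIER: list[tuple[int, str]] = [
--     (5, "Favorable"),   # score 5-6
--     (3, "Neutral"),     # score 3-4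
--     (1, "Cautious"),    # score 1-2
--     (0, "Avoid"),       # score 0
-- ]
--
-- def _compute_base_tier(macro_label: str, valuation_label: str, structure_label: str) -> str:
--     """
--     Compute base composite tier from sub-assessment labels using a score model.
--
--     Score model (each label → points):
--         Supportive/Attractive/Constructive = 2
--         Mixed/Fair/Neutral = 1
--         Headwind/Stretched/Deteriorating = 0
--
--     Thresholds:
--         5-6 → Favorable
--         3-4 → Neutral
--         1-2 → Cautious
--         0   → Avoid
--     """
--     macro_score = _LABEL_SCORES.get(macro_label, 1)
--     valuation_score = _LABEL_SCORES.get(valuation_label, 1)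
--     structure_score = _LABEL_SCORES.get(structure_label, 1)
--     total = macro_score + valuation_score + structure_score
--
--     for threshold, tier in _SCORE_TO_TIER:
--         if total >= threshold:
--             return tier
--     return "Avoid"
-- ===== SOURCE B (Python) =====
-- _LABEL_SCORES: dict[str, int] = {
--     "Supportive": 2,
--     "Mixed": 1,
--     "Headwind": 0,
--     "Attractive": 2,
--     "Fair": 1,
--     "Stretched": 0,
--     "Constructive": 2,
--     "Neutral": 1,
--     "Deteriorating": 0,
-- }
--
-- # tier for each possible total score 0..6
-- _TIER_BY_SCORE: list[str] = [
--     "Avoid",      # 0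
--     "Cautious",   # 1
--     "Cautious",   # 2
--     "Neutral",    # 3
--     "Neutral",    # 4
--     "Favorable",  # 5
--     "Favorable",  # 6
-- ]
--
-- def _compute_base_tier(macro_label: str, valuation_label: str, structure_label: str) -> str:
--     total = (
--         _LABEL_SCORES.get(macro_label, 1)
--         + _LABEL_SCORES.get(valuation_label, 1)
--         + _LABEL_SCORES.get(structure_label, 1)
--     )
--     return _TIER_BY_SCORE[total]
-- ===== Notes on version B (the rewrite author's own statement) =====
-- stated objective: simpler
-- what changed: Replaced the descending threshold scan over _SCORE_TO_TIER (with its unreachable trailing return) by a direct index into a precomputed 7-entry tier table keyed by the total score 0..6.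
import Mathlib
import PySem

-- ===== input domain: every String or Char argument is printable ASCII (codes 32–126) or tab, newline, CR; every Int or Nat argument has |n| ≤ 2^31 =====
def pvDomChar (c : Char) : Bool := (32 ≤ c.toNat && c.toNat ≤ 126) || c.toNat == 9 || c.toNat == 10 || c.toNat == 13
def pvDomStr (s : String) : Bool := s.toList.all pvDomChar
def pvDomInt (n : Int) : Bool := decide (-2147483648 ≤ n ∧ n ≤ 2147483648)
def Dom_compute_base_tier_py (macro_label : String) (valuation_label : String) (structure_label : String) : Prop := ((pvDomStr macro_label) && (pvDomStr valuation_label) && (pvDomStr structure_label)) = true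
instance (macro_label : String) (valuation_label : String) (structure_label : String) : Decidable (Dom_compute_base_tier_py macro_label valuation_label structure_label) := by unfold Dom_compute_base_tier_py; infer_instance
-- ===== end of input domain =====

-- B replaces A's descending threshold scan with a direct index into a precomputed
-- 7-entry tier table keyed by the total score (objective: simpler).

-- ===== PORT A =====
def LABEL_SCORES_A : PySem.Dict String Int :=
  PySem.Dict.ofList
    [("Supportive", 2), ("Mixed", 1), ("Headwind", 0),
     ("Attractive", 2), ("Fair", 1), ("Stretched", 0),
     ("Constructive", 2), ("Neutral", 1), ("Deteriorating", 0)]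

def SCORE_TO_TIER_A : List (Int × String) :=
  [(5, "Favorable"), (3, "Neutral"), (1, "Cautious"), (0, "Avoid")]

-- the for-loop over _SCORE_TO_TIER with early return, then the trailing return "Avoid"
def tierLoopA (total : Int) : List (Int × String) → String
  | [] => "Avoid"
  | (threshold, tier) :: rest => if total ≥ threshold then tier else tierLoopA total rest

def compute_base_tier_py (macro_label : String) (valuation_label : String) (structure_label : String) : String :=
  let macro_score := LABEL_SCORES_A.getD macro_label 1
  let valuation_score := LABEL_SCORES_A.getD valuation_label 1
  let structure_score := LABEL_SCORES_A.getD structure_label 1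
  let total := macro_score + valuation_score + structure_score
  tierLoopA total SCORE_TO_TIER_A

-- ===== PORT B =====
def LABEL_SCORES_B : PySem.Dict String Int :=
  PySem.Dict.ofList
    [("Supportive", 2), ("Mixed", 1), ("Headwind", 0),
     ("Attractive", 2), ("Fair", 1), ("Stretched", 0),
     ("Constructive", 2), ("Neutral", 1), ("Deteriorating", 0)]

def TIER_BY_SCORE_B : List String :=
  ["Avoid", "Cautious", "Cautious", "Neutral", "Neutral", "Favorable", "Favorable"]

def compute_base_tier_py_alt (macro_label : String) (valuation_label : String) (structure_label : String) : String :=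
  let total := LABEL_SCORES_B.getD macro_label 1
             + LABEL_SCORES_B.getD valuation_label 1
             + LABEL_SCORES_B.getD structure_label 1
  -- _TIER_BY_SCORE[total]: Python indexing; total is always in 0..6 so pyGet? never misses
  (PySem.List.pyGet? TIER_BY_SCORE_B total).getD ""

-- ===== PRECONDITION & SPEC =====
def Spec_compute_base_tier_py (macro_label : String) (valuation_label : String) (structure_label : String) (out : String) : Prop := out = compute_base_tier_py_alt macro_label valuation_label structure_label
instance (macro_label : String) (valuation_label : String) (structure_label : String) (out : String) : Decidable (Spec_compute_base_tier_py macro_label valuation_label structure_label out) := by unfold Spec_compute_base_tier_py; infer_instance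

-- ===== CLAIM (what is proved, stated in full; the proofs are below) =====
def Claim_equal_compute_base_tier_py : Prop := ∀ (macro_label : String) (valuation_label : String) (structure_label : String), Dom_compute_base_tier_py macro_label valuation_label structure_label → Spec_compute_base_tier_py macro_label valuation_label structure_label (compute_base_tier_py macro_label valuation_label structure_label)

-- ===== LEMMAS AND PROOFS =====

-- every score lookup yields 0, 1 or 2
theorem scoreA_cases (s : String) :
    LABEL_SCORES_A.getD s 1 = 0 ∨ LABEL_SCORES_A.getD s 1 = 1 ∨ LABEL_SCORES_A.getD s 1 = 2 := by
  have hitems : LABEL_SCORES_A.items =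
      [("Supportive", (2:Int)), ("Mixed", 1), ("Headwind", 0), ("Attractive", 2), ("Fair", 1),
       ("Stretched", 0), ("Constructive", 2), ("Neutral", 1), ("Deteriorating", 0)] := rfl
  rcases hf : List.find? (fun p => p.1 == s) LABEL_SCORES_A.items with _ | p
  · simp [PySem.Dict.getD, PySem.Dict.get?, hf]
  · have hmem := List.mem_of_find?_eq_some hf
    rw [hitems] at hmem
    simp only [List.mem_cons, List.not_mem_nil, or_false] at hmem
    rcases hmem with rfl | rfl | rfl | rfl | rfl | rfl | rfl | rfl | rfl <;>
      simp [PySem.Dict.getD, PySem.Dict.get?, hf]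

theorem scoreB_eq_scoreA (s : String) : LABEL_SCORES_B.getD s 1 = LABEL_SCORES_A.getD s 1 := rfl

-- the two tier maps agree on every total 0..6
theorem tier_agree (t : Int) (h0 : 0 ≤ t) (h6 : t ≤ 6) :
    tierLoopA t SCORE_TO_TIER_A = (PySem.List.pyGet? TIER_BY_SCORE_B t).getD "" := by
  interval_cases t <;> decide

-- ===== VERDICT (by name: the statement is the Claim_ definition above) =====
theorem compute_base_tier_py_spec : Claim_equal_compute_base_tier_py := by
  intro m v s _
  show compute_base_tier_py m v s = compute_base_tier_py_alt m v s
  unfold compute_base_tier_py compute_base_tier_py_alt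
  rw [scoreB_eq_scoreA, scoreB_eq_scoreA, scoreB_eq_scoreA]
  have hm := scoreA_cases m
  have hv := scoreA_cases v
  have hs := scoreA_cases s
  apply tier_agree <;> omega
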